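-- pv_equiv track=rewrite | github.com/JDHernandezCamacho/Python-Prep | M09_errorhandling/toolbox.py | __valor_modal
-- ===== SOURCE A (Python) =====
-- def __valor_modal (lista_recibida):
--     numeros_repetidos = [];
--     for i in range(len(lista_recibida)):
--         for j in range(len(lista_recibida)):
--             if i != j:
--                 if lista_recibida[i] == lista_recibida[j] and lista_recibida[i] not in numeros_repetidos:
--                     numeros_repetidos.append(lista_recibida[i]);
--
--     lista_conteo = [];
--     for i in range(len(numeros_repetidos)):
--         contador = 0;
--         for j in range(len(lista_recibida)):
--             if numeros_repetidos[i] == lista_recibida[j]: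
--                 contador += 1;
--             lista = [numeros_repetidos[i], contador];
--         lista_conteo.append(lista);
--
--     mayor = 0;
--     lista_moda = [];
--     for i in range(len(lista_conteo)):
--         for j in range(len(lista_conteo[i])):
--             if lista_conteo[i][1] > mayor:
--                 mayor = lista_conteo[i][1];
--                 lista_moda = lista_conteo[i];
--
--     return (lista_moda[0], lista_moda[1]);
-- ===== SOURCE B (Python) =====
-- def __valor_modal(lista_recibida):
--     conteo = {}
--     for elemento in lista_recibida:
--         conteo[elemento] = conteo.get(elemento, 0) + 1
--     mejor = None
--     for valor, cantidad in conteo.items():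
--         if cantidad > 1:
--             if mejor is None or cantidad > mejor[1]:
--                 mejor = (valor, cantidad)
--     return (mejor[0], mejor[1])
-- ===== Notes on version B (the rewrite author's own statement) =====
-- stated objective: faster
-- what changed: Replaces A's three quadratic index-scans (duplicate collection, per-duplicate recount, max-scan) with a single counting-dict pass followed by one max-scan over the items with count > 1; dict insertion order reproduces A's first-occurrence tie-break.
import Mathlib
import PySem

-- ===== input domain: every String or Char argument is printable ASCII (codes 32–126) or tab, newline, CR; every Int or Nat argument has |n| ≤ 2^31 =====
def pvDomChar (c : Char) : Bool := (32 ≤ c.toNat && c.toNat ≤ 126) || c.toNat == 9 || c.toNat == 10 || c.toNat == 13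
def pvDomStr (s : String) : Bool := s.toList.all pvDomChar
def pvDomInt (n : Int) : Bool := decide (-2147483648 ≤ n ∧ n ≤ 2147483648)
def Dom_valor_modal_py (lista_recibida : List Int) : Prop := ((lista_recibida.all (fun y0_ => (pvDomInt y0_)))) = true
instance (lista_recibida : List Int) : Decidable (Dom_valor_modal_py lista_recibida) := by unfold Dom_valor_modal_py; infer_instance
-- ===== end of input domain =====

-- B replaces A's three quadratic index-scans by one counting dict plus a single max-scan over its items (same return value on every list with a repeated element; lists without one are excluded by Pre_ because A raises IndexError there).


-- ===== PORT A =====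
-- Literal transliteration of __valor_modal: three phases with index loops
-- (range(len(..)) → pyRange, xs[i] → pyGetD; every index produced by the loops is
-- in range, and the final two reads of lista_moda are in range whenever Pre_ holds —
-- outside Pre_ the Python raises IndexError on those final reads).
def valor_modal_py (lista_recibida : List Int) : List Int :=
  let n : Int := PySem.List.len lista_recibida
  -- numeros_repetidos: nested i/j loops appending first-seen duplicated values
  let numeros_repetidos : List Int :=
    (PySem.List.pyRange 0 n).foldl (fun rep i =>
      (PySem.List.pyRange 0 n).foldl (fun rep j =>
        if i ≠ j ∧ PySem.List.pyGetD lista_recibida i 0 = PySem.List.pyGetD lista_recibida j 0 ∧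
            PySem.List.pyGetD lista_recibida i 0 ∉ rep
        then rep ++ [PySem.List.pyGetD lista_recibida i 0] else rep) rep) []
  -- lista_conteo: per repeated value, inner loop maintaining (contador, lista)
  -- (Python's 'lista' is unassigned before the inner loop; it is only read after an
  -- iteration has assigned it, so the (0, []) initial pair is never observed)
  let lista_conteo : List (List Int) :=
    (PySem.List.pyRange 0 (PySem.List.len numeros_repetidos)).foldl (fun conteo i =>
      let st :=
        (PySem.List.pyRange 0 n).foldl (fun (st : Int × List Int) j =>
          let c := if PySem.List.pyGetD numeros_repetidos i 0 = PySem.List.pyGetD lista_recibida j 0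
                   then st.1 + 1 else st.1
          (c, [PySem.List.pyGetD numeros_repetidos i 0, c])) (0, [])
      conteo ++ [st.2]) []
  -- mayor / lista_moda selection, inner dummy j loop kept
  let sel : Int × List Int :=
    (PySem.List.pyRange 0 (PySem.List.len lista_conteo)).foldl (fun st i =>
      (PySem.List.pyRange 0 (PySem.List.len (PySem.List.pyGetD lista_conteo i []))).foldl (fun st _j =>
        if PySem.List.pyGetD (PySem.List.pyGetD lista_conteo i []) 1 0 > st.1
        then (PySem.List.pyGetD (PySem.List.pyGetD lista_conteo i []) 1 0,
              PySem.List.pyGetD lista_conteo i [])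
        else st) st) (0, [])
  [PySem.List.pyGetD sel.2 0 0, PySem.List.pyGetD sel.2 1 0]

-- ===== PORT B =====
-- Transliteration of Source B: one counting-dict pass, then one max-scan over the items
-- that only considers counts > 1.
def valor_modal_py_alt (lista_recibida : List Int) : List Int :=
  let conteo : PySem.Dict Int Int :=
    lista_recibida.foldl (fun d x => d.insert x (d.getD x 0 + 1)) PySem.Dict.empty
  let mejor : Option (Int × Int) :=
    conteo.items.foldl (fun m p =>
      if p.2 > 1 then
        match m with
        | none => some p
        | some q => if p.2 > q.2 then some p else m
      else m) none
  match mejor with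
  | some (v, c) => [v, c]
  | none => []   -- Python: mejor is None exactly when no count exceeds 1; Source B raises TypeError there (outside Pre_)

-- ===== PRECONDITION & SPEC =====
-- Pre_: the list contains at least one repeated element; otherwise the Python A
-- raises IndexError indexing the then-empty lista_moda.
def Pre_valor_modal_py (lista_recibida : List Int) : Prop := ¬ lista_recibida.Nodup
instance (lista_recibida : List Int) : Decidable (Pre_valor_modal_py lista_recibida) := by unfold Pre_valor_modal_py; infer_instance
def pvWitness_valor_modal_py : List Int := [1, 2, 2, 3, 3, 3]

def Spec_valor_modal_py (lista_recibida : List Int) (out : List Int) : Prop := out = valor_modal_py_alt lista_recibida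
instance (lista_recibida : List Int) (out : List Int) : Decidable (Spec_valor_modal_py lista_recibida out) := by unfold Spec_valor_modal_py; infer_instance

-- ===== CLAIM (what is proved, stated in full; the proofs are below) =====
def Claim_equal_valor_modal_py : Prop := ∀ (lista_recibida : List Int), Dom_valor_modal_py lista_recibida → Pre_valor_modal_py lista_recibida → Spec_valor_modal_py lista_recibida (valor_modal_py lista_recibida)
-- ===== LEMMAS AND PROOFS =====

lemma inner_dedup (v : Int) (P Q : Int → Prop) [DecidablePred P] [DecidablePred Q] :
    ∀ (js : List Int) (acc : List Int),
    js.foldl (fun a j => if P j ∧ Q j ∧ v ∉ a then a ++ [v] else a) acc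
    = if (∃ j ∈ js, P j ∧ Q j) ∧ v ∉ acc then acc ++ [v] else acc := by
  intro js
  induction js with
  | nil => intro acc; simp
  | cons j js ih =>
    intro acc
    simp only [List.foldl_cons]
    by_cases hP : P j <;> by_cases hQ : Q j <;> by_cases hm : v ∈ acc <;>
      simp [ih, hP, hQ, hm]

lemma exists_other_iff (xs : List Int) (i : Int) (h0 : 0 ≤ i) (h1 : i < PySem.List.len xs) :
    ((∃ j ∈ PySem.List.pyRange 0 (PySem.List.len xs),
        ¬ i = j ∧ PySem.List.pyGetD xs i 0 = PySem.List.pyGetD xs j 0))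
    ↔ 2 ≤ xs.count (PySem.List.pyGetD xs i 0) := by
  have hlen : PySem.List.len xs = (xs.length : Int) := by simp [PySem.List.len]
  rw [hlen] at h1 ⊢
  set k := i.toNat with hk
  have hkl : k < xs.length := by omega
  rw [PySem.List.pyGetD_eq_getElem xs 0 h0 h1]
  obtain ⟨v, hv⟩ : ∃ v, xs[i.toNat] = v := ⟨_, rfl⟩
  rw [hv]
  have hsplit : List.count v xs =
      List.count v (xs.take k) + 1 + List.count v (xs.drop (k+1)) := by
    conv_lhs => rw [show xs = xs.take k ++ xs[i.toNat] :: xs.drop (k+1) by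
      rw [← List.drop_eq_getElem_cons hkl, List.take_append_drop]]
    simp [List.count_append, hv]
    omega
  constructor
  · rintro ⟨j, hjr, hne, hval⟩
    rw [PySem.List.mem_pyRange_one] at hjr
    have hj1 : j < (xs.length : Int) := hjr.2
    rw [PySem.List.pyGetD_eq_getElem xs 0 hjr.1 hj1] at hval
    set m := j.toNat with hm
    have hml : m < xs.length := by omega
    rcases lt_or_gt_of_ne (show m ≠ k by omega) with hlt | hgt
    · have hmem : v ∈ xs.take k := by
        rw [List.mem_iff_getElem]
        exact ⟨m, by simp [List.length_take]; omega, by rw [List.getElem_take]; exact hval.symm⟩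
      have := List.count_pos_iff.mpr hmem
      omega
    · have hmem : v ∈ xs.drop (k+1) := by
        rw [List.mem_iff_getElem]
        refine ⟨m - (k+1), by simp [List.length_drop]; omega, ?_⟩
        rw [List.getElem_drop]
        have he : k + 1 + (m - (k+1)) = m := by omega
        simp only [he]
        exact hval.symm
      have := List.count_pos_iff.mpr hmem
      omega
  · intro hc
    have hd : 0 < List.count v (xs.take k) ∨ 0 < List.count v (xs.drop (k+1)) := by omega
    rcases hd with hpos | hpos
    · obtain ⟨m, hml, hval⟩ := List.mem_iff_getElem.mp (List.count_pos_iff.mp hpos)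
      have hmk : m < k := by simp [List.length_take] at hml; omega
      refine ⟨(m : Int), ?_, by omega, ?_⟩
      · rw [PySem.List.mem_pyRange_one]; constructor <;> [positivity; exact_mod_cast by omega]
      · rw [PySem.List.pyGetD_eq_getElem xs 0 (by positivity) (by exact_mod_cast (by omega : m < xs.length))]
        rw [List.getElem_take] at hval
        simp only [Int.toNat_natCast]
        exact hval.symm
    · obtain ⟨m, hml, hval⟩ := List.mem_iff_getElem.mp (List.count_pos_iff.mp hpos)
      have hml' : k + 1 + m < xs.length := by simp [List.length_drop] at hml; omega
      refine ⟨((k + 1 + m : Nat) : Int), ?_, by omega, ?_⟩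
      · rw [PySem.List.mem_pyRange_one]; constructor <;> [positivity; exact_mod_cast hml']
      · rw [PySem.List.pyGetD_eq_getElem xs 0 (by positivity) (by exact_mod_cast hml')]
        rw [List.getElem_drop] at hval
        simp only [Int.toNat_natCast]
        exact hval.symm

lemma rep_eq (xs : List Int) :
    (PySem.List.pyRange 0 (PySem.List.len xs)).foldl (fun rep i =>
      (PySem.List.pyRange 0 (PySem.List.len xs)).foldl (fun rep j =>
        if i ≠ j ∧ PySem.List.pyGetD xs i 0 = PySem.List.pyGetD xs j 0 ∧
            PySem.List.pyGetD xs i 0 ∉ rep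
        then rep ++ [PySem.List.pyGetD xs i 0] else rep) rep) []
    = PySem.Set.ofList (xs.filter (fun v => decide (2 ≤ xs.count v))) := by
  have step1 : ∀ (init : List Int),
      (PySem.List.pyRange 0 (PySem.List.len xs)).foldl (fun rep i =>
        (PySem.List.pyRange 0 (PySem.List.len xs)).foldl (fun rep j =>
          if i ≠ j ∧ PySem.List.pyGetD xs i 0 = PySem.List.pyGetD xs j 0 ∧
              PySem.List.pyGetD xs i 0 ∉ rep
          then rep ++ [PySem.List.pyGetD xs i 0] else rep) rep) init
      = (PySem.List.pyRange 0 (PySem.List.len xs)).foldl (fun rep i =>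
          if 2 ≤ xs.count (PySem.List.pyGetD xs i 0) then
            PySem.Set.add rep (PySem.List.pyGetD xs i 0) else rep) init := by
    intro init
    apply PySem.List.foldl_congr_mem
    intro acc i hi
    rw [PySem.List.mem_pyRange_one] at hi
    rw [inner_dedup (PySem.List.pyGetD xs i 0) (fun j => i ≠ j)
      (fun j => PySem.List.pyGetD xs i 0 = PySem.List.pyGetD xs j 0)]
    have hiff := exists_other_iff xs i hi.1 hi.2
    simp only [ne_eq, hiff]
    by_cases h2 : 2 ≤ List.count (PySem.List.pyGetD xs i 0) xs <;>
      by_cases hm : PySem.List.pyGetD xs i 0 ∈ acc <;>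
        simp [PySem.Set.add, PySem.Set.contains, h2, hm, List.contains_eq_mem]
  rw [step1]
  rw [PySem.List.foldl_pyRange_pyGetD xs 0
    (fun rep v => if 2 ≤ xs.count v then PySem.Set.add rep v else rep) [] le_rfl]
  simp only [Int.toNat_zero, List.drop_zero]
  rw [PySem.List.foldl_ite_eq_foldl_filter (fun v => 2 ≤ xs.count v) PySem.Set.add]
  rw [PySem.Set.ofList_eq_foldl]

lemma ofList_filter (xs : List Int) (f : Int → Bool) :
    PySem.Set.ofList (xs.filter f) = (PySem.Set.ofList xs).filter f := by
  induction xs using List.reverseRecOn with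
  | nil => simp [PySem.Set.ofList]
  | append_singleton xs x ih =>
    have hof : ∀ (ys : List Int) (y : Int),
        PySem.Set.ofList (ys ++ [y]) = PySem.Set.add (PySem.Set.ofList ys) y := by
      intro ys y
      simp [PySem.Set.ofList_eq_foldl, List.foldl_append]
    rw [List.filter_append, hof]
    by_cases hf : f x <;> by_cases hm : x ∈ PySem.Set.ofList xs <;>
      simp [hf, hof, ih, PySem.Set.add, PySem.Set.contains, List.contains_eq_mem,
        List.mem_filter, hm, List.filter_append]

lemma count_pair (v : Int) :
    ∀ (ys : List Int) (c0 : Int) (l0 : List Int),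
    ys.foldl (fun (st : Int × List Int) x =>
      let c := if v = x then st.1 + 1 else st.1
      (c, [v, c])) (c0, l0)
    = (c0 + ys.count v, if ys.isEmpty then l0 else [v, c0 + ys.count v]) := by
  intro ys
  induction ys with
  | nil => intro c0 l0; simp
  | cons x ys ih =>
    intro c0 l0
    simp only [List.foldl_cons]
    rw [ih]
    rcases eq_or_ne ys [] with h | h <;>
      by_cases hx : v = x <;>
        simp [h, hx, eq_comm (a := x) (b := v)] <;>
        omega

lemma conteo_eq (xs rep : List Int) (hxs : xs ≠ []) :
    (PySem.List.pyRange 0 (PySem.List.len rep)).foldl (fun conteo i =>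
      let st :=
        (PySem.List.pyRange 0 (PySem.List.len xs)).foldl (fun (st : Int × List Int) j =>
          let c := if PySem.List.pyGetD rep i 0 = PySem.List.pyGetD xs j 0
                   then st.1 + 1 else st.1
          (c, [PySem.List.pyGetD rep i 0, c])) (0, [])
      conteo ++ [st.2]) []
    = rep.map (fun v => [v, (xs.count v : Int)]) := by
  have hcongr : ∀ (init : List (List Int)),
      (PySem.List.pyRange 0 (PySem.List.len rep)).foldl (fun conteo i =>
        let st :=
          (PySem.List.pyRange 0 (PySem.List.len xs)).foldl (fun (st : Int × List Int) j =>
            let c := if PySem.List.pyGetD rep i 0 = PySem.List.pyGetD xs j 0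
                     then st.1 + 1 else st.1
            (c, [PySem.List.pyGetD rep i 0, c])) (0, [])
        conteo ++ [st.2]) init
      = (PySem.List.pyRange 0 (PySem.List.len rep)).foldl (fun conteo i =>
          conteo ++ [[PySem.List.pyGetD rep i 0, (xs.count (PySem.List.pyGetD rep i 0) : Int)]]) init := by
    intro init
    apply PySem.List.foldl_congr_mem
    intro acc i _
    have hinner := PySem.List.foldl_pyRange_pyGetD xs 0
      (fun (st : Int × List Int) x =>
        let c := if PySem.List.pyGetD rep i 0 = x then st.1 + 1 else st.1
        (c, [PySem.List.pyGetD rep i 0, c])) ((0 : Int), ([] : List Int)) le_rfl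
    simp only [Int.toNat_zero, List.drop_zero] at hinner
    rw [hinner, count_pair]
    simp [List.isEmpty_iff, hxs]
  rw [hcongr]
  rw [PySem.List.foldl_pyRange_pyGetD rep 0
    (fun acc v => acc ++ [[v, (xs.count v : Int)]]) [] le_rfl]
  simp only [Int.toNat_zero, List.drop_zero]
  rw [PySem.List.foldl_append_singleton_eq_map (fun v => [v, (xs.count v : Int)])]
  simp

lemma sel_eq (xs rep : List Int) :
    (PySem.List.pyRange 0 (PySem.List.len (rep.map (fun v => [v, (xs.count v : Int)])))).foldl
      (fun (st : Int × List Int) i =>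
        (PySem.List.pyRange 0 (PySem.List.len
            (PySem.List.pyGetD (rep.map (fun v => [v, (xs.count v : Int)])) i []))).foldl
          (fun (st : Int × List Int) _j =>
            if PySem.List.pyGetD (PySem.List.pyGetD (rep.map (fun v => [v, (xs.count v : Int)])) i []) 1 0 > st.1
            then (PySem.List.pyGetD (PySem.List.pyGetD (rep.map (fun v => [v, (xs.count v : Int)])) i []) 1 0,
                  PySem.List.pyGetD (rep.map (fun v => [v, (xs.count v : Int)])) i [])
            else st) st) ((0 : Int), ([] : List Int))
    = rep.foldl (fun (st : Int × List Int) v =>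
        if (xs.count v : Int) > st.1 then ((xs.count v : Int), [v, (xs.count v : Int)]) else st)
        (0, []) := by
  rw [PySem.List.foldl_pyRange_pyGetD (rep.map (fun v => [v, (xs.count v : Int)])) []
    (fun (st : Int × List Int) r =>
      (PySem.List.pyRange 0 (PySem.List.len r)).foldl
        (fun (st : Int × List Int) _j =>
          if PySem.List.pyGetD r 1 0 > st.1 then (PySem.List.pyGetD r 1 0, r) else st) st)
    ((0 : Int), ([] : List Int)) le_rfl]
  simp only [Int.toNat_zero, List.drop_zero]
  rw [PySem.List.foldl_congr_mem _ _
    (fun (st : Int × List Int) r =>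
      if PySem.List.pyGetD r 1 0 > st.1 then (PySem.List.pyGetD r 1 0, r) else st) _ ?_]
  · rw [List.foldl_map]
    apply PySem.List.foldl_congr_mem
    intro acc v _
    simp [PySem.List.pyGetD_ofNat']
  · intro acc r hr
    obtain ⟨v, _, rfl⟩ := List.mem_map.mp hr
    have hlen : PySem.List.len [v, (xs.count v : Int)] = 2 := by simp [PySem.List.len]
    rw [hlen]
    have hrange : PySem.List.pyRange 0 2 = [0, 1] := by decide
    rw [hrange]
    simp only [List.foldl_cons, List.foldl_nil]
    by_cases h1 : PySem.List.pyGetD [v, (xs.count v : Int)] 1 0 > acc.1 <;>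
      simp [h1]

def selStepA (cnt : Int → Int) (st : Int × List Int) (v : Int) : Int × List Int :=
  if cnt v > st.1 then (cnt v, [v, cnt v]) else st

def selStepB (cnt : Int → Int) (m : Option (Int × Int)) (v : Int) : Option (Int × Int) :=
  match m with
  | none => some (v, cnt v)
  | some q => if cnt v > q.2 then some (v, cnt v) else m

def GoodSel (a : Int × List Int) (b : Option (Int × Int)) : Prop :=
  ∃ v c, 0 < c ∧ a = (c, [v, c]) ∧ b = some (v, c)

def RelSel (a : Int × List Int) (b : Option (Int × Int)) : Prop :=
  (a = ((0 : Int), ([] : List Int)) ∧ b = none) ∨ GoodSel a b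

lemma sel_pair (cnt : Int → Int) :
    ∀ (K : List Int) (a : Int × List Int) (b : Option (Int × Int)),
    (∀ v ∈ K, 0 < cnt v) → RelSel a b →
    RelSel (K.foldl (selStepA cnt) a) (K.foldl (selStepB cnt) b) ∧
    ((K ≠ [] ∨ GoodSel a b) → GoodSel (K.foldl (selStepA cnt) a) (K.foldl (selStepB cnt) b)) := by
  intro K
  induction K with
  | nil =>
    intro a b _ hrel
    exact ⟨hrel, fun h => h.elim (fun h => absurd rfl h) id⟩
  | cons v K ih =>
    intro a b hpos hrel
    have hv : 0 < cnt v := hpos v List.mem_cons_self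
    have hposK : ∀ w ∈ K, 0 < cnt w := fun w hw => hpos w (List.mem_cons_of_mem _ hw)
    have hstep : GoodSel (selStepA cnt a v) (selStepB cnt b v) := by
      rcases hrel with ⟨ha, hb⟩ | ⟨w, c, hc, ha, hb⟩
      · subst ha; subst hb
        exact ⟨v, cnt v, hv, by simp [selStepA, hv], by simp [selStepB]⟩
      · subst ha; subst hb
        by_cases hlt : cnt v > c
        · exact ⟨v, cnt v, hv, by simp [selStepA, hlt], by simp [selStepB, hlt]⟩
        · exact ⟨w, c, hc, by simp [selStepA, hlt], by simp [selStepB, hlt]⟩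
    simp only [List.foldl_cons]
    obtain ⟨r1, r2⟩ := ih (selStepA cnt a v) (selStepB cnt b v) hposK (Or.inr hstep)
    exact ⟨r1, fun _ => r2 (Or.inr hstep)⟩

theorem main_thm (xs : List Int) (hpre : ¬ xs.Nodup) :
    valor_modal_py xs = valor_modal_py_alt xs := by
  obtain ⟨v0, hdup⟩ := List.exists_duplicate_iff_not_nodup.mpr hpre
  have hc2 : 2 ≤ xs.count v0 := List.duplicate_iff_two_le_count.mp hdup
  have hv0 : v0 ∈ xs := hdup.mem
  have hxs : xs ≠ [] := by rintro rfl; simp at hv0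
  set cnt : Int → Int := fun v => ((xs.count v : Nat) : Int) with hcnt
  have hq : (fun v => decide ((1 : Int) < cnt v)) = (fun v => decide (2 ≤ cnt v)) := by
    funext v
    rw [decide_eq_decide]
    omega
  -- B side
  have hB : valor_modal_py_alt xs
      = (match ((PySem.Set.ofList xs).filter (fun v => decide (2 ≤ cnt v))).foldl
            (selStepB cnt) none with
         | some (v, c) => [v, c]
         | none => []) := by
    unfold valor_modal_py_alt
    simp only [PySem.Dict.foldl_insert_getD_add_one_eq_counter, PySem.Dict.items_counter,
      List.foldl_map]
    have hstep : List.foldl (fun (m : Option (Int × Int)) y =>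
          if (1 : Int) < cnt y then selStepB cnt m y else m) none (PySem.Set.ofList xs)
        = List.foldl (selStepB cnt) none
            ((PySem.Set.ofList xs).filter (fun v => decide (2 ≤ cnt v))) := by
      rw [PySem.List.foldl_ite_eq_foldl_filter, hq]
    exact congrArg (fun r => match r with
      | some (v, c) => [v, c]
      | none => ([] : List Int)) hstep
  -- A side
  have hA : valor_modal_py xs
      = (let sel := ((PySem.Set.ofList xs).filter (fun v => decide (2 ≤ cnt v))).foldl
            (selStepA cnt) ((0 : Int), ([] : List Int))
         [PySem.List.pyGetD sel.2 0 0, PySem.List.pyGetD sel.2 1 0]) := by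
    unfold valor_modal_py
    simp only [rep_eq xs]
    simp only [conteo_eq xs _ hxs]
    simp only [sel_eq xs]
    rw [ofList_filter]
    have hp : (fun v => decide (2 ≤ xs.count v)) = (fun v => decide (2 ≤ cnt v)) := by
      funext v
      rw [decide_eq_decide]
      simp [hcnt]
    rw [hp]
    rfl
  have hpos : ∀ v ∈ (PySem.Set.ofList xs).filter (fun v => decide (2 ≤ cnt v)), 0 < cnt v := by
    intro v hv
    have := (List.mem_filter.mp hv).2
    simp at this
    omega
  have hne : (PySem.Set.ofList xs).filter (fun v => decide (2 ≤ cnt v)) ≠ [] := by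
    apply List.ne_nil_of_mem (a := v0)
    rw [List.mem_filter]
    refine ⟨(PySem.Set.mem_ofList xs v0).mpr hv0, ?_⟩
    simp [hcnt]
    omega
  obtain ⟨_, hgood⟩ := sel_pair cnt _ ((0 : Int), ([] : List Int)) none hpos (Or.inl ⟨rfl, rfl⟩)
  obtain ⟨v, c, hc, hA1, hB1⟩ := hgood (Or.inl hne)
  rw [hA, hB, hA1, hB1]
  simp [PySem.List.pyGetD_ofNat']

-- ===== VERDICT (by name: the statement is the Claim_ definition above) =====
theorem valor_modal_py_spec : Claim_equal_valor_modal_py := by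
  intro lista_recibida _ hpre
  unfold Spec_valor_modal_py
  exact main_thm lista_recibida hpre
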